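-- pv_equiv track=rewrite | github.com/mingtaowang/flora | flora/reviews/algorithms/0004_数组评分.py | arrayScore
-- ===== SOURCE A (Python) =====
-- def arrayScore(nums, k, u, l):
--     # write your code here.
--
--     score = 0
--     sumOfSubarray = 0
--
--     for i in range(k):
--         sumOfSubarray += nums[i]
--
--     if sumOfSubarray < u:
--         score += 1
--
--     if sumOfSubarray > l:
--         score -= 1
--
--     for index in range(1, len(nums) - k + 1):
--         sumOfSubarray = sumOfSubarray - nums[index - 1] + nums[index + k - 1]
--
--         if sumOfSubarray < u:
--             score += 1
--
--         if sumOfSubarray > l: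
--             score -= 1
--     return score
-- ===== SOURCE B (Python) =====
-- def arrayScore(nums, k, u, l):
--     prefix = [0]
--     for x in nums:
--         prefix.append(prefix[-1] + x)
--     score = 0
--     for i in range(len(nums) - k + 1):
--         s = prefix[i + k] - prefix[i]
--         if s < u:
--             score += 1
--         if s > l:
--             score -= 1
--     return score
-- ===== Notes on version B (the rewrite author's own statement) =====
-- stated objective: alternative
-- what changed: B precomputes a prefix-sum list once and evaluates every window independently as prefix[i+k]-prefix[i] in one uniform loop, instead of A's special-cased first window plus incremental subtract/add sliding updates.
import Mathlib
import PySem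

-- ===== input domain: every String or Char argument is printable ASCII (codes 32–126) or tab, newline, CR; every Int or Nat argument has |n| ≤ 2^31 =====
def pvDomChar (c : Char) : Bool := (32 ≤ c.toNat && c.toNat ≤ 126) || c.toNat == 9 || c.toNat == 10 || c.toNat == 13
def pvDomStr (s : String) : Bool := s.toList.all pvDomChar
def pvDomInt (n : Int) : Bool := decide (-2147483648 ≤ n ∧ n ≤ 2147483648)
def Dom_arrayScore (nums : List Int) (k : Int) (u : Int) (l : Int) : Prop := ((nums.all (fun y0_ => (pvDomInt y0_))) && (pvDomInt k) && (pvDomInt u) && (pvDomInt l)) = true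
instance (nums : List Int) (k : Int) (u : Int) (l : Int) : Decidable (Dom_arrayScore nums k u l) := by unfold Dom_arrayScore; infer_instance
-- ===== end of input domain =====

-- B replaces A's first-window-plus-sliding-update loop by a pfx-sum list with one uniform
-- window loop (alternative decomposition, same O(n) cost).

-- ===== PORT A =====
def arrayScore (nums : List Int) (k : Int) (u : Int) (l : Int) : Int :=
  -- score = 0; sumOfSubarray = 0; for i in range(k): sumOfSubarray += nums[i]
  let sumOfSubarray : Int :=
    (PySem.List.pyRange 0 k 1).foldl (fun s i => s + PySem.List.pyGetD nums i 0) 0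
  -- if sumOfSubarray < u: score += 1 ; if sumOfSubarray > l: score -= 1
  let score : Int := 0
  let score : Int := if sumOfSubarray < u then score + 1 else score
  let score : Int := if sumOfSubarray > l then score - 1 else score
  -- for index in range(1, len(nums) - k + 1): …
  let st :=
    (PySem.List.pyRange 1 ((nums.length : Int) - k + 1) 1).foldl
      (fun (st : Int × Int) index =>
        let s := st.1 - PySem.List.pyGetD nums (index - 1) 0
                      + PySem.List.pyGetD nums (index + k - 1) 0
        let sc := if s < u then st.2 + 1 else st.2
        let sc := if s > l then sc - 1 else sc
        (s, sc))
      (sumOfSubarray, score)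
  st.2

-- ===== PORT B =====
def arrayScore_alt (nums : List Int) (k : Int) (u : Int) (l : Int) : Int :=
  -- pfx = [0]; for x in nums: pfx.append(pfx[-1] + x)
  let pfx : List Int :=
    nums.foldl (fun p x => p ++ [PySem.List.pyGetD p (-1) 0 + x]) [0]
  -- score = 0; for i in range(len(nums) - k + 1): s = pfx[i+k] - pfx[i]; …
  (PySem.List.pyRange 0 ((nums.length : Int) - k + 1) 1).foldl
    (fun score i =>
      let s := PySem.List.pyGetD pfx (i + k) 0 - PySem.List.pyGetD pfx i 0
      let score := if s < u then score + 1 else score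
      if s > l then score - 1 else score)
    0

-- ===== PRECONDITION & SPEC =====
-- Pre_ excludes exactly the inputs where A raises IndexError: k > len(nums) (first-window
-- access nums[k-1], i.e. some nums[i] of the first loop) and k < 0 (the sliding loop always
-- reaches an out-of-range nums[index - 1]).
def Pre_arrayScore (nums : List Int) (k : Int) (u : Int) (l : Int) : Prop :=
  0 ≤ k ∧ k ≤ (nums.length : Int)
instance (nums : List Int) (k : Int) (u : Int) (l : Int) : Decidable (Pre_arrayScore nums k u l) := by unfold Pre_arrayScore; infer_instance
def pvWitness_arrayScore : List Int × Int × Int × Int := ([1, -2, 3], 2, 3, 0)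

def Spec_arrayScore (nums : List Int) (k : Int) (u : Int) (l : Int) (out : Int) : Prop := out = arrayScore_alt nums k u l
instance (nums : List Int) (k : Int) (u : Int) (l : Int) (out : Int) : Decidable (Spec_arrayScore nums k u l out) := by unfold Spec_arrayScore; infer_instance

-- ===== CLAIM (what is proved, stated in full; the proofs are below) =====
def Claim_equal_arrayScore : Prop := ∀ (nums : List Int) (k : Int) (u : Int) (l : Int), Dom_arrayScore nums k u l → Pre_arrayScore nums k u l → Spec_arrayScore nums k u l (arrayScore nums k u l)
-- ===== LEMMAS AND PROOFS =====

-- score increment contributed by one window of sum s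
def pvG (u l s : Int) : Int := (if s < u then 1 else 0) + (if s > l then -1 else 0)

-- prefix sums and window sums, the common description of both loops
def pvPref (nums : List Int) (j : Int) : Int := (nums.take j.toNat).sum

def pvW (nums : List Int) (k i : Int) : Int := pvPref nums (i + k) - pvPref nums i

theorem pv_take_succ_sum (nums : List Int) (j : Nat) (h : j < nums.length) :
    (nums.take (j + 1)).sum = (nums.take j).sum + nums.getD j 0 := by
  rw [List.take_succ, List.sum_append, List.getElem?_eq_getElem h, List.getD_eq_getElem nums 0 h]
  simp

theorem pv_pfx_eq (nums : List Int) :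
    nums.foldl (fun p x => p ++ [PySem.List.pyGetD p (-1) 0 + x]) [0]
      = (List.range (nums.length + 1)).map (fun j => ((nums.take j).sum : Int)) := by
  induction nums using List.reverseRecOn with
  | nil => simp
  | append_singleton xs x ih =>
    rw [List.foldl_append, ih]
    simp only [List.foldl_cons, List.foldl_nil, List.length_append, List.length_singleton]
    rw [List.range_succ (n := xs.length), List.map_append, List.map_singleton,
        PySem.List.pyGetD_neg_one_append_singleton]
    rw [List.range_succ (n := xs.length + 1), List.map_append, List.map_singleton]
    congr 1
    · rw [List.range_succ (n := xs.length), List.map_append]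
      rw [List.map_singleton]
      congr 1
      · refine List.map_congr_left (fun j hj => ?_)
        rw [List.mem_range] at hj
        rw [List.take_append_of_le_length (by omega)]
      · simp
    · simp [List.take_length]

theorem pv_pfx_get (nums : List Int) (j : Int) (h0 : 0 ≤ j) (h1 : j ≤ (nums.length : Int)) :
    PySem.List.pyGetD (nums.foldl (fun p x => p ++ [PySem.List.pyGetD p (-1) 0 + x]) [0]) j 0
      = pvPref nums j := by
  rw [pv_pfx_eq, show (j : Int) = ((j.toNat : Nat) : Int) by omega, PySem.List.pyGetD_natCast]
  rw [List.getD_eq_getElem?_getD, List.getElem?_map, List.getElem?_range (by omega)]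
  simp only [Option.map_some, Option.getD_some, pvPref]
  rw [show ((j.toNat : Nat) : Int).toNat = j.toNat by omega]

theorem pv_sum_range_getD (nums : List Int) (m : Nat) (h : m ≤ nums.length) :
    ((List.range m).map (fun j => nums.getD j 0)).sum = (nums.take m).sum := by
  induction m with
  | zero => simp
  | succ m ih =>
    rw [List.range_succ, List.map_append, List.sum_append, ih (by omega),
        pv_take_succ_sum nums m (by omega)]
    simp

theorem pv_loop1_eq (nums : List Int) (k : Int) (h0 : 0 ≤ k) (h1 : k ≤ (nums.length : Int)) :
    (PySem.List.pyRange 0 k 1).foldl (fun s i => s + PySem.List.pyGetD nums i 0) 0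
      = pvW nums k 0 := by
  rw [PySem.List.pyRange_one, PySem.List.foldl_add, List.map_map]
  have hmap : ((fun i => PySem.List.pyGetD nums i 0) ∘ fun kk : Nat => (0 : Int) + kk)
      = fun j : Nat => nums.getD j 0 := by
    funext j; simp
  rw [hmap, show ((k : Int) - 0).toNat = k.toNat by omega,
      pv_sum_range_getD nums k.toNat (by omega)]
  simp [pvW, pvPref]

theorem pv_slide (nums : List Int) (k : Int) (hk : 0 ≤ k) (i : Int) (h1 : 1 ≤ i)
    (h2 : i ≤ (nums.length : Int) - k) :
    pvW nums k (i - 1) - PySem.List.pyGetD nums (i - 1) 0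
        + PySem.List.pyGetD nums (i + k - 1) 0 = pvW nums k i := by
  rw [show (i - 1 : Int) = (((i - 1).toNat : Nat) : Int) by omega, PySem.List.pyGetD_natCast,
      show (i + k - 1 : Int) = (((i + k - 1).toNat : Nat) : Int) by omega,
      PySem.List.pyGetD_natCast]
  simp only [pvW, pvPref]
  rw [show ((((i - 1).toNat : Nat) : Int) + k).toNat = (i + k - 1).toNat by omega,
      show (((i - 1).toNat : Nat) : Int).toNat = (i - 1).toNat by omega,
      show (i + k).toNat = (i + k - 1).toNat + 1 by omega,
      show i.toNat = (i - 1).toNat + 1 by omega,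
      pv_take_succ_sum nums (i + k - 1).toNat (by omega),
      pv_take_succ_sum nums (i - 1).toNat (by omega)]
  ring

theorem pv_loopA (nums : List Int) (k u l : Int) (hk : 0 ≤ k)
    (hkn : k ≤ (nums.length : Int)) (m : Nat) :
    ∀ (i sc : Int), 1 ≤ i → i + m = (nums.length : Int) - k + 1 →
    ((PySem.List.pyRange i ((nums.length : Int) - k + 1) 1).foldl
        (fun (st : Int × Int) index =>
          let s := st.1 - PySem.List.pyGetD nums (index - 1) 0
                        + PySem.List.pyGetD nums (index + k - 1) 0
          let sc := if s < u then st.2 + 1 else st.2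
          let sc := if s > l then sc - 1 else sc
          (s, sc))
        (pvW nums k (i - 1), sc)).2
      = sc + ((PySem.List.pyRange i ((nums.length : Int) - k + 1) 1).map
          (fun j => pvG u l (pvW nums k j))).sum := by
  induction m with
  | zero =>
    intro i sc h1 h2
    rw [PySem.List.pyRange_one_eq_nil (by omega)]
    simp
  | succ m ih =>
    intro i sc h1 h2
    rw [PySem.List.pyRange_one_cons (by omega)]
    simp only [List.foldl_cons, List.map_cons, List.sum_cons]
    rw [pv_slide nums k hk i h1 (by omega)]
    have hih := ih (i + 1) (if pvW nums k i > l then (if pvW nums k i < u then sc + 1 else sc) - 1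
      else (if pvW nums k i < u then sc + 1 else sc)) (by omega) (by omega)
    rw [show (i + 1 - 1 : Int) = i by ring] at hih
    rw [hih]
    simp only [pvG]
    split_ifs <;> ring

theorem pv_foldl_score (u l : Int) (sFn : Int → Int) (r : List Int) :
    ∀ (sc : Int),
    List.foldl (fun score i =>
        let s := sFn i
        let score := if s < u then score + 1 else score
        if s > l then score - 1 else score) sc r
      = sc + (r.map (fun i => pvG u l (sFn i))).sum := by
  induction r with
  | nil => simp
  | cons a r ih =>
    intro sc
    simp only [List.foldl_cons, List.map_cons, List.sum_cons]
    rw [ih]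
    simp only [pvG]
    split_ifs <;> ring

-- ===== VERDICT (by name: the statement is the Claim_ definition above) =====
theorem arrayScore_spec : Claim_equal_arrayScore := by
  intro nums k u l _ hpre
  obtain ⟨hk, hkn⟩ := hpre
  show arrayScore nums k u l = arrayScore_alt nums k u l
  have hB : arrayScore_alt nums k u l
      = ((PySem.List.pyRange 0 ((nums.length : Int) - k + 1) 1).map
          (fun j => pvG u l (pvW nums k j))).sum := by
    unfold arrayScore_alt
    rw [pv_foldl_score u l
      (fun i => PySem.List.pyGetD (nums.foldl (fun p x => p ++ [PySem.List.pyGetD p (-1) 0 + x]) [0]) (i + k) 0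
        - PySem.List.pyGetD (nums.foldl (fun p x => p ++ [PySem.List.pyGetD p (-1) 0 + x]) [0]) i 0),
      zero_add]
    refine congrArg List.sum (List.map_congr_left fun j hj => ?_)
    rw [PySem.List.mem_pyRange_one] at hj
    rw [pv_pfx_get nums (j + k) (by omega) (by omega), pv_pfx_get nums j (by omega) (by omega)]
    rfl
  have hA : arrayScore nums k u l
      = pvG u l (pvW nums k 0)
        + ((PySem.List.pyRange 1 ((nums.length : Int) - k + 1) 1).map
            (fun j => pvG u l (pvW nums k j))).sum := by
    unfold arrayScore
    simp only []
    rw [pv_loop1_eq nums k hk hkn]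
    have hL := pv_loopA nums k u l hk hkn ((nums.length : Int) - k).toNat 1
      (if pvW nums k 0 > l then (if pvW nums k 0 < u then (0 : Int) + 1 else 0) - 1
        else (if pvW nums k 0 < u then (0 : Int) + 1 else 0)) (by omega) (by omega)
    rw [show (1 - 1 : Int) = 0 by ring] at hL
    rw [hL]
    have : (if pvW nums k 0 > l then (if pvW nums k 0 < u then (0 : Int) + 1 else 0) - 1
        else (if pvW nums k 0 < u then (0 : Int) + 1 else 0)) = pvG u l (pvW nums k 0) := by
      simp only [pvG]
      split_ifs <;> ring
    rw [this]
  rw [hA, hB, PySem.List.pyRange_one_cons (a := 0) (by omega)]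
  simp only [List.map_cons, List.sum_cons, zero_add]
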